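-- pv_equiv track=rewrite | github.com/serhankoral/VideoFlower | videoflower.py | pick_best_stream_url
-- ===== SOURCE A (Python) =====
-- BAD_STREAM_PARTS = [
--     "blob:", "/embed/", ".css", ".js", "cloudfront.net/\\", "|", "(", ")", "{", "}",
--     ".webmanifest", "manifest.json", "favicon", "browserconfig",
-- ]
--
-- def is_valid_stream_url(url):
--     """Yanlış pozitif URL'leri elemek için temel doğrulama."""
--     if not url:
--         return False
--     u = url.strip()
--     if not (u.startswith("http://") or u.startswith("https://") or u.startswith("/")):
--         return False
--     low = u.lower()
--     if any(b in low for b in BAD_STREAM_PARTS):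
--         return False
--     if " " in u or "\\" in u:
--         return False
--     if u.count("http://") + u.count("https://") > 1:
--         return False
--     return True
--
-- def stream_score(url):
--     """En iyi stream adayını seçmek için skor."""
--     low = url.lower()
--     if not is_valid_stream_url(url):
--         return -999
--     score = 0
--     if ".m3u8" in low:
--         score += 100
--     if ".mpd" in low:
--         score += 90
--     if ".mp4" in low:
--         score += 80
--     if "master" in low:
--         score += 30
--     if "variant" in low:
--         score += 15
--     if "/m3u/" in low or "/hls/" in low:
--         score += 20
--     if ".ts" in low:
--         score -= 20
--     return score
--
-- def pick_best_stream_url(urls):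
--     """Adaylar arasından en güvenilir URL'yi seç."""
--     if not urls:
--         return None
--     valid = [u for u in urls if is_valid_stream_url(u)]
--     if not valid:
--         return None
--     valid.sort(key=stream_score, reverse=True)
--     return valid[0]
-- ===== SOURCE B (Python) =====
-- BAD_STREAM_PARTS = [
--     "blob:", "/embed/", ".css", ".js", "cloudfront.net/\\", "|", "(", ")", "{", "}",
--     ".webmanifest", "manifest.json", "favicon", "browserconfig",
-- ]
--
-- SCORE_TABLE = [(".m3u8", 100), (".mpd", 90), (".mp4", 80),
--                ("master", 30), ("variant", 15), (".ts", -20)]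
--
-- def _stream_candidate_score(url):
--     """Return the stream score if url is a valid candidate, else None."""
--     if not url:
--         return None
--     u = url.strip()
--     low = u.lower()
--     if not (u.startswith(("http://", "https://", "/"))
--             and all(b not in low for b in BAD_STREAM_PARTS)
--             and " " not in u and "\\" not in u
--             and u.count("http://") + u.count("https://") <= 1):
--         return None
--     full_low = url.lower()
--     score = sum(pts for sub, pts in SCORE_TABLE if sub in full_low)
--     if "/m3u/" in full_low or "/hls/" in full_low:
--         score += 20
--     return score
--
-- def pick_best_stream_url(urls):
--     """Single linear pass: keep the first valid URL with the highest score."""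
--     best = None
--     best_score = None
--     for u in urls:
--         s = _stream_candidate_score(u)
--         if s is not None and (best is None or s > best_score):
--             best, best_score = u, s
--     return best
-- ===== Notes on version B (the rewrite author's own statement) =====
-- stated objective: simpler
-- what changed: Replaces build-valid-list + stable reverse sort + take-first (with a separate validity check and chained-if scoring) by a single linear pass keeping the first highest-scoring URL, driven by one joint validate-and-score helper that returns None for invalid URLs and sums an additive score table otherwise.
import Mathlib
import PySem

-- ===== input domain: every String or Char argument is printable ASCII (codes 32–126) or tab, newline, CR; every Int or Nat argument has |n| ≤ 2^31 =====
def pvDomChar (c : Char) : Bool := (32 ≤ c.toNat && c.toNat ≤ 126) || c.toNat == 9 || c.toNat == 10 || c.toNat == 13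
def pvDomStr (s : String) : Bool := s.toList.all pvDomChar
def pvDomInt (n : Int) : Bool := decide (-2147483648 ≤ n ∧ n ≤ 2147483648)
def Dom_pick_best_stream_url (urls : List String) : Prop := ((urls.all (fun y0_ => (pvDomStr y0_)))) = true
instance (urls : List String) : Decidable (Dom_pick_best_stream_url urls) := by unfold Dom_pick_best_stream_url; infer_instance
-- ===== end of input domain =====

-- B replaces A's build-valid-list + stable reverse sort + take-first by a single linear
-- pass with a joint validate-and-score helper (score-or-None) and an additive score table
-- (objective: simpler).


-- ===== PORT A =====
def BAD_STREAM_PARTS : List String :=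
  ["blob:", "/embed/", ".css", ".js", "cloudfront.net/\\", "|", "(", ")", "{", "}",
   ".webmanifest", "manifest.json", "favicon", "browserconfig"]

def is_valid_stream_url (url : String) : Bool :=
  if url == "" then false
  else
    let u := PySem.Str.strip url
    if !(PySem.Str.startswith u "http://" || PySem.Str.startswith u "https://"
          || PySem.Str.startswith u "/") then false
    else
      let low := PySem.Str.lower u
      if BAD_STREAM_PARTS.any (fun b => PySem.Str.isIn b low) then false
      else if PySem.Str.isIn " " u || PySem.Str.isIn "\\" u then false
      else if ((PySem.Str.count u "http://" : Int) + (PySem.Str.count u "https://" : Int)) > 1 then false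
      else true

def stream_score (url : String) : Int :=
  let low := PySem.Str.lower url
  if !is_valid_stream_url url then -999
  else
    let score : Int := 0
    let score := if PySem.Str.isIn ".m3u8" low then score + 100 else score
    let score := if PySem.Str.isIn ".mpd" low then score + 90 else score
    let score := if PySem.Str.isIn ".mp4" low then score + 80 else score
    let score := if PySem.Str.isIn "master" low then score + 30 else score
    let score := if PySem.Str.isIn "variant" low then score + 15 else score
    let score := if PySem.Str.isIn "/m3u/" low || PySem.Str.isIn "/hls/" low then score + 20 else score
    let score := if PySem.Str.isIn ".ts" low then score - 20 else score
    score

def pick_best_stream_url (urls : List String) : Option String :=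
  if urls = [] then none
  else
    let valid := urls.filter (fun u => is_valid_stream_url u)
    if valid = [] then none
    else (PySem.List.sorted valid stream_score true).head?

-- ===== PORT B =====
def SCORE_TABLE : List (String × Int) :=
  [(".m3u8", 100), (".mpd", 90), (".mp4", 80), ("master", 30), ("variant", 15), (".ts", -20)]

-- 'sum(pts for sub, pts in SCORE_TABLE if sub in full_low)' ported as fold over the filtered table
def stream_candidate_score (url : String) : Option Int :=
  if url == "" then none
  else
    let u := PySem.Str.strip url
    let low := PySem.Str.lower u
    if !((PySem.Str.startswith u "http://" || PySem.Str.startswith u "https://"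
            || PySem.Str.startswith u "/")
         && BAD_STREAM_PARTS.all (fun b => !PySem.Str.isIn b low)
         && !PySem.Str.isIn " " u && !PySem.Str.isIn "\\" u
         && ((PySem.Str.count u "http://" : Int) + (PySem.Str.count u "https://" : Int)) ≤ 1)
    then none
    else
      let fullLow := PySem.Str.lower url
      let score :=
        (SCORE_TABLE.filter (fun p => PySem.Str.isIn p.1 fullLow)).foldl (fun s p => s + p.2) 0
      let score := if PySem.Str.isIn "/m3u/" fullLow || PySem.Str.isIn "/hls/" fullLow
                   then score + 20 else score
      some score

def pick_best_stream_url_alt (urls : List String) : Option String :=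
  (urls.foldl (fun acc u =>
      match stream_candidate_score u with
      | none => acc
      | some s =>
        match acc with
        | none => some (u, s)
        | some (b, bs) => if bs < s then some (u, s) else some (b, bs)) none).map Prod.fst

-- ===== PRECONDITION & SPEC =====
def Spec_pick_best_stream_url (urls : List String) (out : Option String) : Prop := out = pick_best_stream_url_alt urls
instance (urls : List String) (out : Option String) : Decidable (Spec_pick_best_stream_url urls out) := by unfold Spec_pick_best_stream_url; infer_instance

-- ===== CLAIM (what is proved, stated in full; the proofs are below) =====
def Claim_equal_pick_best_stream_url : Prop := ∀ (urls : List String), Dom_pick_best_stream_url urls → Spec_pick_best_stream_url urls (pick_best_stream_url urls)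

-- ===== LEMMAS AND PROOFS =====

theorem all_not_eq_not_any {α : Type} (p : α → Bool) :
    ∀ (l : List α), l.all (fun x => !p x) = !l.any p := by
  intro l; induction l with
  | nil => rfl
  | cons x t ih => cases h : p x <;> simp [h, ih]

-- B's validity test agrees with A's, and B's table score is A's chained score on valid urls
theorem validity_eq (s1 s2 s3 sp bs : Bool) (cnt : Int) (r : String → Bool) :
    ((s1 || s2 || s3) && BAD_STREAM_PARTS.all (fun b => !r b) && !sp && !bs
        && cnt ≤ 1)
    = (if !(s1 || s2 || s3) then false
       else if BAD_STREAM_PARTS.any r then false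
       else if sp || bs then false
       else if cnt > 1 then false
       else true) := by
  rw [all_not_eq_not_any]
  by_cases hc : cnt > 1
  · have h1 : decide (cnt ≤ 1) = false := by simp; omega
    cases hd : (s1 || s2 || s3) <;> cases ha : BAD_STREAM_PARTS.any r <;>
      cases sp <;> cases bs <;> simp [h1, hc]
  · have h1 : decide (cnt ≤ 1) = true := by simp; omega
    cases hd : (s1 || s2 || s3) <;> cases ha : BAD_STREAM_PARTS.any r <;>
      cases sp <;> cases bs <;> simp [h1, hc]

theorem score_table_eq (q : String × Int → Bool) (m1 m2 m3 m4 m5 m6 u1 u2 : Bool)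
    (h1 : q (".m3u8", 100) = m1) (h2 : q (".mpd", 90) = m2) (h3 : q (".mp4", 80) = m3)
    (h4 : q ("master", 30) = m4) (h5 : q ("variant", 15) = m5) (h6 : q (".ts", -20) = m6) :
    (let score := (SCORE_TABLE.filter q).foldl (fun s p => s + p.2) (0 : Int)
     let score := if u1 || u2 then score + 20 else score
     score)
    = (let score : Int := 0
       let score := if m1 then score + 100 else score
       let score := if m2 then score + 90 else score
       let score := if m3 then score + 80 else score
       let score := if m4 then score + 30 else score
       let score := if m5 then score + 15 else score
       let score := if u1 || u2 then score + 20 else score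
       let score := if m6 then score - 20 else score
       score) := by
  simp only [SCORE_TABLE, List.filter_cons, List.filter_nil, h1, h2, h3, h4, h5, h6]
  cases m1 <;> cases m2 <;> cases m3 <;> cases m4 <;> cases m5 <;> cases m6 <;>
    cases u1 <;> cases u2 <;> rfl

theorem key_lemma (e s1 s2 s3 sp bs : Bool) (cnt : Int)
    (r : String → Bool) (q : String × Int → Bool) (m1 m2 m3 m4 m5 m6 u1 u2 : Bool)
    (h1 : q (".m3u8", 100) = m1) (h2 : q (".mpd", 90) = m2) (h3 : q (".mp4", 80) = m3)
    (h4 : q ("master", 30) = m4) (h5 : q ("variant", 15) = m5) (h6 : q (".ts", -20) = m6) :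
    (if e then none
     else
       if !((s1 || s2 || s3) && BAD_STREAM_PARTS.all (fun b => !r b) && !sp && !bs
             && cnt ≤ 1) then none
       else
         some (
           let score := (SCORE_TABLE.filter q).foldl (fun s p => s + p.2) (0 : Int)
           let score := if u1 || u2 then score + 20 else score
           score)) =
    (if (if e then false
         else if !(s1 || s2 || s3) then false
         else if BAD_STREAM_PARTS.any r then false
         else if sp || bs then false
         else if cnt > 1 then false
         else true) then
       some (
         if !(if e then false
              else if !(s1 || s2 || s3) then false
              else if BAD_STREAM_PARTS.any r then false
              else if sp || bs then false
              else if cnt > 1 then false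
              else true) then -999
         else
           let score : Int := 0
           let score := if m1 then score + 100 else score
           let score := if m2 then score + 90 else score
           let score := if m3 then score + 80 else score
           let score := if m4 then score + 30 else score
           let score := if m5 then score + 15 else score
           let score := if u1 || u2 then score + 20 else score
           let score := if m6 then score - 20 else score
           score)
     else none) := by
  cases e with
  | true => rfl
  | false =>
    simp only [Bool.false_eq_true, if_false]
    rw [← validity_eq s1 s2 s3 sp bs cnt r]
    cases hv : ((s1 || s2 || s3) && BAD_STREAM_PARTS.all (fun b => !r b) && !sp && !bs
        && cnt ≤ 1) with
    | false => rfl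
    | true =>
      simp only [Bool.not_true, Bool.false_eq_true, if_false, if_true]
      exact congrArg some (score_table_eq q m1 m2 m3 m4 m5 m6 u1 u2 h1 h2 h3 h4 h5 h6)

-- B's joint validate-and-score helper agrees with A's is_valid + stream_score pair
theorem score_or_none_eq (url : String) :
    stream_candidate_score url =
      if is_valid_stream_url url then some (stream_score url) else none := by
  unfold stream_candidate_score stream_score is_valid_stream_url
  exact key_lemma (url == "")
    (PySem.Str.startswith (PySem.Str.strip url) "http://")
    (PySem.Str.startswith (PySem.Str.strip url) "https://")
    (PySem.Str.startswith (PySem.Str.strip url) "/")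
    (PySem.Str.isIn " " (PySem.Str.strip url))
    (PySem.Str.isIn "\\" (PySem.Str.strip url))
    ((PySem.Str.count (PySem.Str.strip url) "http://" : Int)
      + (PySem.Str.count (PySem.Str.strip url) "https://" : Int))
    (fun b => PySem.Str.isIn b (PySem.Str.lower (PySem.Str.strip url)))
    (fun p => PySem.Str.isIn p.1 (PySem.Str.lower url))
    (PySem.Str.isIn ".m3u8" (PySem.Str.lower url))
    (PySem.Str.isIn ".mpd" (PySem.Str.lower url))
    (PySem.Str.isIn ".mp4" (PySem.Str.lower url))
    (PySem.Str.isIn "master" (PySem.Str.lower url))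
    (PySem.Str.isIn "variant" (PySem.Str.lower url))
    (PySem.Str.isIn ".ts" (PySem.Str.lower url))
    (PySem.Str.isIn "/m3u/" (PySem.Str.lower url))
    (PySem.Str.isIn "/hls/" (PySem.Str.lower url))
    rfl rfl rfl rfl rfl rfl

-- the first-extremal step of Python's max(·, key)
def maxStep (key : String → Int) (o : Option String) (x : String) : Option String :=
  match o with
  | none => some x
  | some m => if key m < key x then some x else some m

theorem max?_eq_foldl_maxStep (key : String → Int) (xs : List String) :
    PySem.List.max? xs key = xs.foldl (maxStep key) none := by
  unfold PySem.List.max?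
  congr 1
  funext o x
  cases o <;> rfl

-- a guarded fold equals the fold over the filtered list
theorem foldl_guard_filter {α β : Type} (p : α → Bool) (f : β → α → β) :
    ∀ (xs : List α) (a : β),
      xs.foldl (fun acc x => if p x then f acc x else acc) a = (xs.filter p).foldl f a := by
  intro xs
  induction xs with
  | nil => intro a; rfl
  | cons x t ih =>
    intro a
    by_cases h : p x = true <;> simp [h, ih]

-- head of insertBy with the reverse-sort comparator
theorem head?_insertBy (key : String → Int) (x : String) (ys : List String) :
    (PySem.List.insertBy (fun a b => decide (key b < key a)) x ys).head? =
      (match ys with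
       | [] => some x
       | y :: _ => if key y < key x then some x else some y) := by
  cases ys with
  | nil => rfl
  | cons y t => by_cases h : key y < key x <;> simp [PySem.List.insertBy, h]

-- head of the insertion-sort fold is the running first-max
theorem head?_foldl_insertBy (key : String → Int) :
    ∀ (xs : List String) (acc : List String),
      (xs.foldl (fun a x => PySem.List.insertBy (fun a b => decide (key b < key a)) x a) acc).head? =
        xs.foldl (maxStep key) acc.head? := by
  intro xs
  induction xs with
  | nil => intro acc; rfl
  | cons x t ih =>
    intro acc
    rw [List.foldl_cons, List.foldl_cons, ih, head?_insertBy]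
    cases acc with
    | nil => rfl
    | cons y t' => by_cases h : key y < key x <;> simp [maxStep, h]

-- head of Python's stable reverse sort = Python's max(·, key) (first extremal element)
theorem head?_sorted_rev (key : String → Int) (xs : List String) :
    (PySem.List.sorted xs key true).head? = PySem.List.max? xs key := by
  rw [PySem.List.sorted_rev_eq_foldl_insertBy, head?_foldl_insertBy,
    max?_eq_foldl_maxStep]
  rfl

-- the pair-carrying fold of B projects to max?
theorem foldl_pair_max (key : String → Int) :
    ∀ (xs : List String) (m : Option String),
      xs.foldl (fun acc u =>
          match acc with
          | none => some (u, key u)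
          | some (b, bs) => if bs < key u then some (u, key u) else some (b, bs))
        (m.map (fun b => (b, key b))) =
      (xs.foldl (maxStep key) m).map (fun b => (b, key b)) := by
  intro xs
  induction xs with
  | nil => intro m; rfl
  | cons x t ih =>
    intro m
    rw [List.foldl_cons, List.foldl_cons]
    cases m with
    | none => exact ih (some x)
    | some b =>
      by_cases h : key b < key x
      · simpa [maxStep, h] using ih (some x)
      · simpa [maxStep, h] using ih (some b)

theorem alt_eq_max? (urls : List String) :
    pick_best_stream_url_alt urls =
      PySem.List.max? (urls.filter (fun u => is_valid_stream_url u)) stream_score := by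
  unfold pick_best_stream_url_alt
  have hstep : (fun (acc : Option (String × Int)) u =>
      match stream_candidate_score u with
      | none => acc
      | some s =>
        match acc with
        | none => some (u, s)
        | some (b, bs) => if bs < s then some (u, s) else some (b, bs)) =
      (fun acc u =>
        if is_valid_stream_url u then
          (match acc with
           | none => some (u, stream_score u)
           | some (b, bs) => if bs < stream_score u then some (u, stream_score u)
                             else some (b, bs))
        else acc) := by
    funext acc u
    rw [score_or_none_eq]
    by_cases h : is_valid_stream_url u <;> simp [h]
  rw [hstep, foldl_guard_filter, max?_eq_foldl_maxStep,
      show (none : Option (String × Int)) =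
        (Option.map (fun b => (b, stream_score b)) (none : Option String)) from rfl,
      foldl_pair_max stream_score]
  cases (urls.filter (fun u => is_valid_stream_url u)).foldl (maxStep stream_score) none <;>
    simp

-- ===== VERDICT (by name: the statement is the Claim_ definition above) =====
theorem pick_best_stream_url_spec : Claim_equal_pick_best_stream_url := by
  intro urls _
  unfold Spec_pick_best_stream_url
  rw [alt_eq_max?]
  unfold pick_best_stream_url
  by_cases h0 : urls = []
  · subst h0; rfl
  · simp only [h0, if_false]
    by_cases hv : urls.filter (fun u => is_valid_stream_url u) = []
    · simp [hv, PySem.List.max?]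
    · simp only [hv, if_false]
      exact head?_sorted_rev stream_score _
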